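-- pv_equiv track=rewrite | github.com/pypi-data/pypi-mirror-339 | packages/markten/markten-0.4.0.tar.gz/markten-0.4.0/markten/more_itertools.py | recursive_generator
-- ===== SOURCE A (Python) =====
-- from collections.abc import (
--     AsyncIterable,
--     AsyncIterator,
--     Callable,
--     Generator,
--     Iterable,
--     Iterator,
--     Mapping,
-- )
-- from typing import Any, Generic, TypeVar
--
-- def recursive_generator(
--     keys: list[str],
--     params_dict: Mapping[str, Iterable[Any]],
-- ) -> Generator[dict[str, Any], None, None]:
--     """
--     Recursively iterate over the given keys, producing a dict of values.
--     """
--     keys_head = keys[0]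
--     # Base case: this is the last remaining key
--     if len(keys) == 1:
--         for value in params_dict[keys_head]:
--             yield {keys_head: value}
--         return
--
--     # Recursive case, other keys remain, and we need to iterate over those too
--     keys_tail = keys[1:]
--
--     for value in params_dict[keys_head]:
--         # Iterate over remaining keys
--         for current_params in recursive_generator(keys_tail, params_dict):
--             # Overall keys is the union of the current key-value pair with
--             # the params yielded by the recursion
--             yield {keys_head: value} | current_params
-- ===== SOURCE B (Python) =====
-- import itertools
--
--
-- def recursive_generator(keys, params_dict):
--     """Cartesian product over keys' value lists, one dict per combination."""
--     value_lists = [params_dict[k] for k in keys]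
--     for combo in itertools.product(*value_lists):
--         yield dict(zip(keys, combo))
-- ===== Notes on version B (the rewrite author's own statement) =====
-- stated objective: idiomatic
-- what changed: Replaces the recursion over keys (which merges O(d) singleton dicts per yield and re-generates the whole tail product for every head value) with itertools.product over the value lists, building each result dict in one pass with dict(zip(keys, combo)).
-- outside the precondition, e.g. on recursive_generator(['a', 'b'], {'a': []}): A returns [], B raises KeyError
import Mathlib
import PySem

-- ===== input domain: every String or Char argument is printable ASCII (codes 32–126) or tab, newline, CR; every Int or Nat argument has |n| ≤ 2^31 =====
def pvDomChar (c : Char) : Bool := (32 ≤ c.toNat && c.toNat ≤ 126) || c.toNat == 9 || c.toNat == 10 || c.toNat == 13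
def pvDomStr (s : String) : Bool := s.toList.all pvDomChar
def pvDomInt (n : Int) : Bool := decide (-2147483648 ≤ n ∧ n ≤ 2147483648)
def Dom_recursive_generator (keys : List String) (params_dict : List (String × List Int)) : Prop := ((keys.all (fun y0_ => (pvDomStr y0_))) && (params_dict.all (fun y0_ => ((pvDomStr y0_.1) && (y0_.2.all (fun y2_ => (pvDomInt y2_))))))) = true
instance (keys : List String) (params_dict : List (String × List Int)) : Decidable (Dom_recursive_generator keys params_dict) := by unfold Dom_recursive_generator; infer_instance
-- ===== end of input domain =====

-- B replaces A's recursion over keys by a Cartesian product of the value lists,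
-- building each result dict in one pass (idiomatic itertools.product form).
-- Equivalence is about the returned sequence of dicts (both Pythons are generators).

-- ===== PORT A =====
-- A's recursion: keys[0] (IndexError on [] — excluded by Pre_), base case for one key,
-- otherwise for each head value merge {head: value} | current_params from the recursion.
def recursive_generator : List String → List (String × List Int) → List (List (String × Int))
  | [], _ => []   -- keys[0] raises IndexError in Python; Pre_ excludes keys = []
  | keys_head :: keys_tail, params_dict =>
    -- params_dict[keys_head]; a missing key raises KeyError in Python, excluded by Pre_
    let vals := (PySem.Dict.mk params_dict).getD keys_head []
    if keys_tail = [] then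
      vals.map (fun value => (PySem.Dict.ofList [(keys_head, value)]).items)
    else
      vals.flatMap (fun value =>
        (recursive_generator keys_tail params_dict).map (fun current_params =>
          -- {keys_head: value} | current_params
          ((PySem.Dict.ofList [(keys_head, value)]).update current_params).items))

-- ===== PORT B =====
-- itertools.product(*value_lists): last list varies fastest
def pyProduct : List (List Int) → List (List Int)
  | [] => [[]]
  | vs :: rest => vs.flatMap (fun v => (pyProduct rest).map (fun combo => v :: combo))

def recursive_generator_alt (keys : List String) (params_dict : List (String × List Int)) : List (List (String × Int)) :=
  let value_lists := keys.map (fun k => (PySem.Dict.mk params_dict).getD k [])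
  (pyProduct value_lists).map (fun combo => (PySem.Dict.ofList (keys.zip combo)).items)

-- ===== PRECONDITION & SPEC =====
-- Pre_ excludes the inputs on which the Python A raises — empty keys (IndexError from
-- keys[0]) and a key missing from params_dict (KeyError) — plus inputs with a missing key
-- that A never looks up because an earlier key's value list is empty (A returns [] there,
-- but B's eager list of value lists raises the same KeyError up front).
def Pre_recursive_generator (keys : List String) (params_dict : List (String × List Int)) : Prop :=
  keys ≠ [] ∧ ∀ k ∈ keys, (PySem.Dict.mk params_dict).contains k = true
instance (keys : List String) (params_dict : List (String × List Int)) : Decidable (Pre_recursive_generator keys params_dict) := by unfold Pre_recursive_generator; infer_instance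

def pvWitness_recursive_generator : List String × (List (String × List Int)) :=
  (["a", "b"], [("a", [1, 2]), ("b", [3])])

def Spec_recursive_generator (keys : List String) (params_dict : List (String × List Int)) (out : List (List (String × Int))) : Prop := out = recursive_generator_alt keys params_dict
instance (keys : List String) (params_dict : List (String × List Int)) (out : List (List (String × Int))) : Decidable (Spec_recursive_generator keys params_dict out) := by unfold Spec_recursive_generator; infer_instance

-- ===== CLAIM (what is proved, stated in full; the proofs are below) =====
def Claim_equal_recursive_generator : Prop := ∀ (keys : List String) (params_dict : List (String × List Int)), Dom_recursive_generator keys params_dict → Pre_recursive_generator keys params_dict → Spec_recursive_generator keys params_dict (recursive_generator keys params_dict)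

-- ===== LEMMAS AND PROOFS =====

-- abbreviated insert-fold used throughout
def insFold (d : PySem.Dict String Int) (ps : List (String × Int)) : PySem.Dict String Int :=
  ps.foldl (fun d p => d.insert p.1 p.2) d

theorem update_eq_insFold (d : PySem.Dict String Int) (ps : List (String × Int)) :
    d.update ps = insFold d ps := rfl

theorem ofList_eq_insFold (ps : List (String × Int)) :
    PySem.Dict.ofList ps = insFold PySem.Dict.empty ps := rfl

-- get? of an insert-fold: last binding in ps wins, else the base dict
theorem get?_insFold (ps : List (String × Int)) (d : PySem.Dict String Int) (x : String) :
    (insFold d ps).get? x =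
      ((ps.reverse.find? (fun p => p.1 == x)).map Prod.snd).or (d.get? x) := by
  induction ps generalizing d with
  | nil => simp [insFold]
  | cons p ps ih =>
    simp only [insFold, List.foldl_cons, List.reverse_cons, List.find?_append]
    rw [show (List.foldl (fun d p => d.insert p.1 p.2) (d.insert p.1 p.2) ps) = insFold (d.insert p.1 p.2) ps from rfl, ih]
    cases h : ps.reverse.find? (fun p => p.1 == x) with
    | some q => simp
    | none =>
      simp only [Option.map_none, Option.none_or, List.find?_cons, List.find?_nil]
      by_cases hx : p.1 = x
      · subst hx; simp [PySem.Dict.get?_insert_self]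
      · have hb : (p.1 == x) = false := by simpa using hx
        simp [hb, PySem.Dict.get?_insert, Ne.symm hx]

-- keys of an insert-fold
theorem keys_insFold (ps : List (String × Int)) (d : PySem.Dict String Int) :
    (insFold d ps).keys = PySem.Set.update d.keys (ps.map Prod.fst) := by
  simpa [insFold] using PySem.Dict.keys_foldl_insert_key ps Prod.fst (fun d p => p.2) d

theorem nodup_keys_insFold (ps : List (String × Int)) (d : PySem.Dict String Int)
    (h : d.keys.Nodup) : (insFold d ps).keys.Nodup := by
  simpa [insFold] using PySem.Dict.nodup_keys_foldl_insert_key ps Prod.fst (fun d p => p.2) d h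

-- two dicts with Nodup keys, equal keys and equal get? have equal items
theorem items_eq_of_keys_get?_eq (d d' : PySem.Dict String Int)
    (hd : d.keys.Nodup) (hd' : d'.keys.Nodup)
    (hk : d.keys = d'.keys) (hg : ∀ x, d.get? x = d'.get? x) :
    d.items = d'.items := by
  rw [PySem.Dict.items_eq_map_keys d hd 0, PySem.Dict.items_eq_map_keys d' hd' 0, hk]
  exact List.map_congr_left (fun k _ => by
    simp [PySem.Dict.getD_eq_get?_getD, hg k])

-- get? of a dict (as a literal pair list) is first-match lookup
theorem get?_eq_find? (l : List (String × Int)) (x : String) :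
    (PySem.Dict.mk l).get? x = (l.find? (fun p => p.1 == x)).map Prod.snd := rfl

-- on a list with Nodup keys, reverse-find equals find
theorem reverse_find?_of_nodup (l : List (String × Int)) (x : String)
    (h : (l.map Prod.fst).Nodup) :
    l.reverse.find? (fun p => p.1 == x) = l.find? (fun p => p.1 == x) := by
  induction l with
  | nil => rfl
  | cons p l ih =>
    simp only [List.map_cons, List.nodup_cons] at h
    simp only [List.reverse_cons, List.find?_append, List.find?_cons]
    by_cases hx : p.1 = x
    · subst hx
      have : l.reverse.find? (fun p' => p'.1 == p.1) = none := by
        rw [List.find?_eq_none]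
        intro q hq hq'
        exact h.1 (by
          have : q.1 = p.1 := by simpa using hq'
          exact this ▸ List.mem_map_of_mem (List.mem_reverse.mp hq))
      simp [this]
    · rw [ih h.2]
      have hb : (p.1 == x) = false := by simpa using hx
      cases hf : l.find? (fun p => p.1 == x) with
      | some q => simp [hb]
      | none => simp [hb]

-- MASTER: folding the items of (ofList ps) into d equals folding ps itself into d
theorem insFold_items_ofList (ps : List (String × Int)) (d : PySem.Dict String Int)
    (hd : d.keys.Nodup) :
    insFold d (PySem.Dict.ofList ps).items = insFold d ps := by
  have hnod : (PySem.Dict.ofList ps).keys.Nodup := PySem.Dict.nodup_keys_ofList ps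
  apply PySem.Dict.ext
  apply items_eq_of_keys_get?_eq _ _ (nodup_keys_insFold _ _ hd) (nodup_keys_insFold _ _ hd)
  · rw [keys_insFold, keys_insFold]
    have hkeys : (PySem.Dict.ofList ps).items.map Prod.fst = (PySem.Dict.ofList ps).keys := rfl
    rw [hkeys]
    have h1 : (PySem.Dict.ofList ps).keys = PySem.Set.ofList (ps.map Prod.fst) := by
      have := keys_insFold ps PySem.Dict.empty
      rw [ofList_eq_insFold]
      simpa [PySem.Set.update_nil_left] using this
    rw [h1, PySem.Set.update_eq_append_filter, PySem.Set.update_eq_append_filter]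
    have h2 : PySem.Set.ofList (PySem.Set.ofList (ps.map Prod.fst)) = PySem.Set.ofList (ps.map Prod.fst) := by
      have h3 := PySem.Set.update_eq_append_of_disjoint (s := ([] : List String))
        (xs := PySem.Set.ofList (ps.map Prod.fst))
        (PySem.Set.nodup_ofList _) (by intro x hx; simp)
      rw [← PySem.Set.update_nil_left, h3]; simp
    rw [h2]
  · intro x
    rw [get?_insFold, get?_insFold]
    congr 1
    -- reverse-find on the deduplicated items equals reverse-find on ps
    rw [reverse_find?_of_nodup _ _ hnod]
    have hfind : ((PySem.Dict.ofList ps).items.find? (fun p => p.1 == x)).map Prod.snd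
        = (PySem.Dict.ofList ps).get? x := (get?_eq_find? _ _).symm
    have hget : (PySem.Dict.ofList ps).get? x
        = ((ps.reverse.find? (fun p => p.1 == x)).map Prod.snd).or none := by
      rw [ofList_eq_insFold, get?_insFold]; rfl
    -- both sides are .map Prod.snd of the find?s; compare via the Option values
    have : ((PySem.Dict.ofList ps).items.find? (fun p => p.1 == x)).map Prod.snd
        = (ps.reverse.find? (fun p => p.1 == x)).map Prod.snd := by
      rw [hfind, hget, Option.or_none]
    -- Prod.snd map equality suffices for the .or with same tail
    exact this

-- pointwise merge lemma: {k:v} | dict(zip rest c)  =  dict((k,v) :: zip rest c)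
theorem merge_singleton (k : String) (v : Int) (ps : List (String × Int)) :
    ((PySem.Dict.ofList [(k, v)]).update (PySem.Dict.ofList ps).items).items
      = (PySem.Dict.ofList ((k, v) :: ps)).items := by
  rw [update_eq_insFold, insFold_items_ofList]
  · rfl
  · have : (PySem.Dict.ofList [(k, v)]).keys = [k] := rfl
    rw [this]; exact List.nodup_singleton k

-- main equivalence on nonempty keys
theorem flatten_singletons {A B : Type} (f : A -> B) (l : List A) :
    (l.map (fun v => [f v])).flatten = l.map f := by
  induction l with
  | nil => rfl
  | cons a l ih => simp [ih]

theorem main_equiv (keys : List String) (params_dict : List (String × List Int))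
    (h : keys ≠ []) :
    recursive_generator keys params_dict = recursive_generator_alt keys params_dict := by
  induction keys with
  | nil => exact absurd rfl h
  | cons k rest ih =>
    by_cases hr : rest = []
    · subst hr
      simp only [recursive_generator, recursive_generator_alt, pyProduct,
        List.map_cons, List.map_nil, List.flatMap_def, if_true]
      rw [flatten_singletons (fun v => [v]), List.map_map]
      exact List.map_congr_left (fun v _ => rfl)
    · rw [recursive_generator_alt]
      simp only [recursive_generator, if_neg hr, ih hr, recursive_generator_alt,
        List.map_cons, pyProduct, List.map_flatMap]
      congr 1
      funext v
      simp only [List.map_map]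
      congr 1
      funext c
      simp only [Function.comp_apply, List.zip_cons_cons]
      exact merge_singleton k v (rest.zip c)

-- ===== VERDICT (by name: the statement is the Claim_ definition above) =====
theorem recursive_generator_spec : Claim_equal_recursive_generator := by
  intro keys params_dict _ hpre
  unfold Spec_recursive_generator
  exact main_equiv keys params_dict hpre.1
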